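-- pv_equiv track=rewrite | github.com/tallisonbarros/AgenteColetorSQL | src/ui.py | _redact_conn_str
-- ===== SOURCE A (Python) =====
-- def _redact_conn_str(conn_str: str) -> str:
--     parts = conn_str.split(";")
--     redacted = []
--     for part in parts:
--         if part.upper().startswith("PWD="):
--             redacted.append("PWD=***")
--         else:
--             redacted.append(part)
--     return ";".join(redacted)
-- ===== SOURCE B (Python) =====
-- def _redact_conn_str(conn_str: str) -> str:
--     out = []
--     i = 0
--     n = len(conn_str)
--     while True:
--         j = i
--         while j < n and conn_str[j] != ";":
--             j += 1
--         field = conn_str[i:j]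
--         if field[:4].upper() == "PWD=":
--             out.append("PWD=***")
--         else:
--             out.append(field)
--         if j == n:
--             return "".join(out)
--         out.append(";")
--         i = j + 1
-- ===== Notes on version B (the rewrite author's own statement) =====
-- stated objective: alternative
-- what changed: Replaces split-into-parts-list/loop/join with a single left-to-right index scanner that finds each field boundary itself and emits the redacted output as it goes, never materialising the parts list.
import Mathlib
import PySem

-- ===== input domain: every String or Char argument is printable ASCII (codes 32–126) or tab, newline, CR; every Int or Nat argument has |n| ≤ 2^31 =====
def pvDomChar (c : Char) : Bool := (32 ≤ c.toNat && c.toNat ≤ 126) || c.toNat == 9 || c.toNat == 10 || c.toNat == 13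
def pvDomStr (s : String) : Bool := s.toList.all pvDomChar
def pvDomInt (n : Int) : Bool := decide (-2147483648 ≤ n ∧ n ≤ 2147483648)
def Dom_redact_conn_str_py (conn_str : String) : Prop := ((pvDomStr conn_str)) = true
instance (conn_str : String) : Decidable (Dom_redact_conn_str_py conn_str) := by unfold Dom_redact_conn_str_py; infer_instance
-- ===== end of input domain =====

-- B replaces A's split/loop/join with a single left-to-right scanner over the characters
-- (alternative decomposition; same O(n) cost; return values proved equal on all of Dom).

-- ===== PORT A =====
def redact_conn_str_py (conn_str : String) : String :=
  let parts := PySem.Chars.splitOn conn_str.toList [';']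
  let redacted := parts.foldl (fun acc part =>
    if PySem.Chars.startswith (PySem.Chars.upper part) "PWD=".toList then
      acc ++ ["PWD=***".toList]
    else
      acc ++ [part]) ([] : List (List Char))
  String.ofList (PySem.Chars.join [';'] redacted)

-- ===== PORT B =====
-- the scanner: take the current field (up to the next ';'), emit it (masked if it
-- case-insensitively starts with "PWD="), then continue after the ';' if there is one
-- mask one field in place: the 4-character window check of Source B
def redactPiece (field : List Char) : List Char :=
  if PySem.Chars.upper (field.take 4) == "PWD=".toList then "PWD=***".toList else field

def redactGo (cs : List Char) : List Char :=
  match h : cs.dropWhile (fun c => !(c == ';')) with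
  | [] => redactPiece (cs.takeWhile (fun c => !(c == ';')))
  | _ :: t => redactPiece (cs.takeWhile (fun c => !(c == ';'))) ++ ';' :: redactGo t
termination_by cs.length
decreasing_by
  have h1 : (cs.dropWhile (fun c => !(c == ';'))).length ≤ cs.length := List.length_dropWhile_le _ _
  rw [h] at h1
  simp at h1
  omega

def redact_conn_str_py_alt (conn_str : String) : String :=
  String.ofList (redactGo conn_str.toList)

-- ===== PRECONDITION & SPEC =====
def Spec_redact_conn_str_py (conn_str : String) (out : String) : Prop := out = redact_conn_str_py_alt conn_str
instance (conn_str : String) (out : String) : Decidable (Spec_redact_conn_str_py conn_str out) := by unfold Spec_redact_conn_str_py; infer_instance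

-- ===== CLAIM (what is proved, stated in full; the proofs are below) =====
def Claim_equal_redact_conn_str_py : Prop := ∀ (conn_str : String), Dom_redact_conn_str_py conn_str → Spec_redact_conn_str_py conn_str (redact_conn_str_py conn_str)

-- ===== LEMMAS AND PROOFS =====

-- the simple structural one-character split that splitOn [';'] computes
def consHead (p : List Char) : List (List Char) → List (List Char)
  | [] => [p]
  | x :: xs => (p ++ x) :: xs

def splitc : List Char → List (List Char)
  | [] => [[]]
  | c :: t => if c = ';' then [] :: splitc t else consHead [c] (splitc t)

theorem splitc_ne_nil (cs : List Char) : splitc cs ≠ [] := by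
  induction cs with
  | nil => simp [splitc]
  | cons c t ih =>
    simp only [splitc]
    split
    · simp
    · cases h : splitc t with
      | nil => exact absurd h ih
      | cons x xs => simp [consHead]

theorem consHead_consHead (p q : List Char) (l : List (List Char)) :
    consHead p (consHead q l) = consHead (p ++ q) l := by
  cases l <;> simp [consHead]

theorem splitOn_go_spec : ∀ (fuel : Nat) (l cur : List Char) (acc : List (List Char)),
    l.length < fuel →
    PySem.Chars.splitOn.go [';'] fuel l cur acc = acc.reverse ++ consHead cur.reverse (splitc l) := by
  intro fuel
  induction fuel with
  | zero => intro l cur acc h; omega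
  | succ f ih =>
    intro l cur acc h
    cases l with
    | nil => simp [PySem.Chars.splitOn.go, splitc, consHead]
    | cons c rest =>
      by_cases hc : c = ';'
      · subst hc
        have hpre : [';'].isPrefixOf (';' :: rest) = true := by simp [List.isPrefixOf]
        rw [PySem.Chars.splitOn.go]
        simp only [hpre, if_pos, List.length_nil, List.length_cons, Nat.zero_add,
          List.drop_succ_cons, List.drop_zero]
        have := ih rest [] (cur.reverse :: acc) (by simpa using Nat.lt_of_succ_lt_succ h)
        rw [this]
        have hsp : splitc (';' :: rest) = [] :: splitc rest := by simp [splitc]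
        rw [hsp]
        cases hs : splitc rest with
        | nil => exact absurd hs (splitc_ne_nil rest)
        | cons x xs => simp [consHead]
      · have hpre : [';'].isPrefixOf (c :: rest) = false := by
          simp [List.isPrefixOf]
          intro hcc
          exact hc hcc.symm
        rw [PySem.Chars.splitOn.go]
        simp only [hpre, Bool.false_eq_true, if_false]
        have := ih rest (c :: cur) acc (by simpa using Nat.lt_of_succ_lt_succ h)
        rw [this]
        have hsp : splitc (c :: rest) = consHead [c] (splitc rest) := by simp [splitc, hc]
        rw [hsp, consHead_consHead]
        simp

theorem splitOn_eq_splitc (cs : List Char) : PySem.Chars.splitOn cs [';'] = splitc cs := by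
  rw [PySem.Chars.splitOn]
  rw [splitOn_go_spec (cs.length + 1) cs [] [] (by omega)]
  cases hs : splitc cs with
  | nil => exact absurd hs (splitc_ne_nil cs)
  | cons x xs => simp [consHead]

-- the per-field test: checking the first four characters equals A's startswith-on-upper
theorem check_eq (part : List Char) :
    (PySem.Chars.upper (part.take 4) == "PWD=".toList) =
      PySem.Chars.startswith (PySem.Chars.upper part) "PWD=".toList := by
  have hlen : ("PWD=".toList).length = 4 := by decide
  rw [Bool.eq_iff_iff]
  simp only [PySem.Chars.upper, PySem.Chars.startswith, beq_iff_eq,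
    List.isPrefixOf_iff_prefix, List.prefix_iff_eq_take, hlen, List.map_take]
  exact ⟨fun h => h.symm, fun h => h.symm⟩

-- A's loop builds exactly the map
theorem foldl_append_map (f : List Char → List Char) :
    ∀ (l : List (List Char)) (a : List (List Char)),
      l.foldl (fun acc p => acc ++ [f p]) a = a ++ l.map f := by
  intro l
  induction l with
  | nil => simp
  | cons x t ih => intro a; simp [List.foldl, ih]

-- splitc in terms of takeWhile/dropWhile (the scanner's decomposition)
theorem splitc_take_drop (cs : List Char) :
    splitc cs =
      match cs.dropWhile (fun c => !(c == ';')) with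
      | [] => [cs]
      | _ :: t => cs.takeWhile (fun c => !(c == ';')) :: splitc t := by
  induction cs with
  | nil => simp [splitc]
  | cons c rest ih =>
    by_cases hc : c = ';'
    · subst hc
      simp [splitc, List.dropWhile, List.takeWhile]
    · simp only [splitc, if_neg hc]
      have hb : (!(c == ';')) = true := by simp [hc]
      rw [List.dropWhile_cons, List.takeWhile_cons]
      simp only [hb, if_pos]
      rw [ih]
      cases hd : rest.dropWhile (fun c => !(c == ';')) with
      | nil => simp [consHead]
      | cons d t => simp [consHead]

-- the mask-or-keep function both programs apply to a field
def maskField (part : List Char) : List Char :=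
  if PySem.Chars.startswith (PySem.Chars.upper part) "PWD=".toList then "PWD=***".toList else part

theorem mask_piece (part : List Char) : redactPiece part = maskField part := by
  simp only [redactPiece, maskField]
  rw [check_eq]

theorem redactGo_eq_join (cs : List Char) :
    redactGo cs = PySem.Chars.join [';'] ((splitc cs).map maskField) := by
  induction hn : cs.length using Nat.strong_induction_on generalizing cs with
  | _ n ih =>
  subst hn
  rw [splitc_take_drop cs, redactGo.eq_def]
  split
  case _ heq =>
    simp only [heq]
    have htw : cs.takeWhile (fun c => !(c == ';')) = cs := by
      have h2 := List.takeWhile_append_dropWhile (p := fun c => !(c == ';')) (l := cs)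
      rw [heq] at h2; simpa using h2
    rw [htw]
    simp only [List.map_cons, List.map_nil, PySem.Chars.join_singleton]
    exact mask_piece cs
  case _ d t heq =>
    simp only [heq]
    have hlt : t.length < cs.length := by
      have h1 : (cs.dropWhile (fun c => !(c == ';'))).length ≤ cs.length :=
        List.length_dropWhile_le _ _
      rw [heq] at h1; simp at h1; omega
    have ihr := ih t.length hlt t rfl
    cases hs : splitc t with
    | nil => exact absurd hs (splitc_ne_nil t)
    | cons x xs =>
      rw [hs] at ihr
      simp only [List.map_cons, PySem.Chars.join_cons_cons]
      rw [mask_piece, ihr]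
      simp

-- ===== VERDICT (by name: the statement is the Claim_ definition above) =====
theorem redact_conn_str_py_spec : Claim_equal_redact_conn_str_py := by
  intro conn_str _
  unfold Spec_redact_conn_str_py redact_conn_str_py redact_conn_str_py_alt
  rw [splitOn_eq_splitc]
  have hfun : (fun (acc : List (List Char)) part =>
      if PySem.Chars.startswith (PySem.Chars.upper part) "PWD=".toList then
        acc ++ ["PWD=***".toList]
      else
        acc ++ [part]) = fun acc part => acc ++ [maskField part] := by
    funext acc part
    by_cases h : PySem.Chars.startswith (PySem.Chars.upper part) "PWD=".toList = true
    · simp only [maskField, if_pos h]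
    · simp only [maskField, if_neg h]
  simp only [hfun, foldl_append_map, redactGo_eq_join, List.nil_append]
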